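-- pv_equiv track=rewrite | github.com/cjain316/OmegaSum | OmegaSum/Mapmaker.py | compute
-- ===== SOURCE A (Python) =====
-- def zeroArray(len): #O(n^2)
--     return [0 for i in range(len)]
--
-- def getSide(length, l):
--     bar = zeroArray(length)
--     max = min((length - l + 1), l)
--
--     for i in range(max):
--         bar[i] = i + 1
--         bar[len(bar) - 1 - i] = i + 1
--
--     for i in range(len(bar) - 2 * max):
--         bar[i + max] = max
--     return bar
--
-- def computeMap(verticalBars, horizontalBars):
--         # initialize empty 2d array with correct dimensions
--         map = []
--         for i in range(len(verticalBars[0])):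
--             map.append(zeroArray(len(horizontalBars[0])))
--
--         # set horizontal bar
--         horizontalBar = zeroArray(len(horizontalBars[0]))
--         for arr in horizontalBars:
--             for i in range(len(arr)):
--                 horizontalBar[i] += arr[i]
--         map[0] = horizontalBar
--
--         # set vertical bar
--         verticalBar = zeroArray(len(verticalBars[0]))
--         for a in range(len(verticalBars)):
--             for b in range(len(verticalBars[a])):
--                 verticalBar[b] += verticalBars[a][b]
--
--         for i in range(len(verticalBar)):
--             map[i][0] = verticalBar[i]
--
--         # traverse and set values
--         for r in range(len(map) - 1):
--             for c in range(len(map[r]) - 1):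
--
--                 for i in range(len(horizontalBars)):
--                     map[r + 1][c + 1] += verticalBars[i][r + 1] * horizontalBars[i][c + 1]
--         return map
--
-- def compute(arr):
--     L = min(len(arr), len(arr[0]))
--
--     vertBars = []
--     horzBars = []
--
--     for i in range(L):
--         vertBars.append(getSide(len(arr), i + 1))
--         horzBars.append(getSide(len(arr[0]), i + 1))
--     map = computeMap(vertBars, horzBars)
--
--     sum = 0
--     for r in range(len(vertBars[0])):
--         for c in range(len(horzBars[0])):
--             sum += arr[r][c] * map[r][c]
--
--     return sum
-- ===== SOURCE B (Python) =====
-- def compute(arr):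
--     # Closed-form tent weights per cell instead of building bar arrays and the map matrix.
--     m, n = len(arr), len(arr[0])
--     L = min(m, n)
--     ab = [(min(l + 1, m - l), min(l + 1, n - l)) for l in range(L)]
--     total = 0
--     for r in range(m):
--         p = min(r + 1, m - r)
--         row = arr[r]
--         for c in range(n):
--             q = min(c + 1, n - c)
--             total += row[c] * sum(min(p, x) * min(q, y) for x, y in ab)
--     return total
-- ===== Notes on version B (the rewrite author's own statement) =====
-- stated objective: alternative
-- what changed: B derives each bar value from the closed-form tent formula min(i+1,len-i,cap) and sums arr[r][c] times a per-cell weight directly, instead of building bar arrays by index mutation and assembling the full map matrix with special-cased first row/column before the final dot product.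
import Mathlib
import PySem

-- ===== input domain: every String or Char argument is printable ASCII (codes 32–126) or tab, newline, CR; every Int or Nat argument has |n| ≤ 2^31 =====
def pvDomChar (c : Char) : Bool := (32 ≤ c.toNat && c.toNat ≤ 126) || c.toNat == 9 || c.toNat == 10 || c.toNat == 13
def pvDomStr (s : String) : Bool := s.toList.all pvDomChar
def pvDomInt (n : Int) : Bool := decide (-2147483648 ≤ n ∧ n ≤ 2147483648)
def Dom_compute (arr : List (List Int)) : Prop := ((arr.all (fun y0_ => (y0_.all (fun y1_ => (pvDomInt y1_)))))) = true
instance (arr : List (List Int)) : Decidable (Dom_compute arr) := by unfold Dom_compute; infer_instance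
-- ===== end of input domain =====

-- B replaces A's bar-array construction and full map matrix by a closed-form tent weight per cell; objective: alternative (same asymptotic cost).

-- ===== PORT A =====
def zeroArray (len : Int) : List Int :=
  (PySem.List.pyRange 0 len 1).map (fun _ => (0:Int))

def getSide (length l : Int) : List Int :=
  let bar := zeroArray length
  let mx := min (length - l + 1) l
  let bar := (PySem.List.pyRange 0 mx 1).foldl (fun bar i =>
      let bar := PySem.List.pySetD bar i (i+1)
      PySem.List.pySetD bar (PySem.List.len bar - 1 - i) (i+1)) bar
  (PySem.List.pyRange 0 (PySem.List.len bar - 2*mx) 1).foldl (fun bar i =>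
      PySem.List.pySetD bar (i + mx) mx) bar

def computeMap (verticalBars horizontalBars : List (List Int)) : List (List Int) :=
  let map0 := (PySem.List.pyRange 0 (PySem.List.len (PySem.List.pyGetD verticalBars 0 [])) 1).foldl
      (fun m _ => m ++ [zeroArray (PySem.List.len (PySem.List.pyGetD horizontalBars 0 []))]) []
  let horizontalBar := horizontalBars.foldl (fun hb arr2 =>
      (PySem.List.pyRange 0 (PySem.List.len arr2) 1).foldl
        (fun hb i => PySem.List.pySetD hb i (PySem.List.pyGetD hb i 0 + PySem.List.pyGetD arr2 i 0)) hb)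
      (zeroArray (PySem.List.len (PySem.List.pyGetD horizontalBars 0 [])))
  let map1 := PySem.List.pySetD map0 0 horizontalBar
  let verticalBar := (PySem.List.pyRange 0 (PySem.List.len verticalBars) 1).foldl (fun vb a =>
      (PySem.List.pyRange 0 (PySem.List.len (PySem.List.pyGetD verticalBars a [])) 1).foldl
        (fun vb b => PySem.List.pySetD vb b (PySem.List.pyGetD vb b 0 + PySem.List.pyGetD (PySem.List.pyGetD verticalBars a []) b 0)) vb)
      (zeroArray (PySem.List.len (PySem.List.pyGetD verticalBars 0 [])))
  let map2 := (PySem.List.pyRange 0 (PySem.List.len verticalBar) 1).foldl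
      (fun m i => PySem.List.pySetD m i (PySem.List.pySetD (PySem.List.pyGetD m i []) 0 (PySem.List.pyGetD verticalBar i 0))) map1
  (PySem.List.pyRange 0 (PySem.List.len map2 - 1) 1).foldl (fun m r =>
      (PySem.List.pyRange 0 (PySem.List.len (PySem.List.pyGetD m r []) - 1) 1).foldl (fun m c =>
        (PySem.List.pyRange 0 (PySem.List.len horizontalBars) 1).foldl (fun m i =>
          PySem.List.pySetD m (r+1) (PySem.List.pySetD (PySem.List.pyGetD m (r+1) []) (c+1)
            (PySem.List.pyGetD (PySem.List.pyGetD m (r+1) []) (c+1) 0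
              + PySem.List.pyGetD (PySem.List.pyGetD verticalBars i []) (r+1) 0
                * PySem.List.pyGetD (PySem.List.pyGetD horizontalBars i []) (c+1) 0))) m) m) map2

def compute (arr : List (List Int)) : Int :=
  let L := min (PySem.List.len arr) (PySem.List.len (PySem.List.pyGetD arr 0 []))
  let bars := (PySem.List.pyRange 0 L 1).foldl (fun (vh : List (List Int) × List (List Int)) i =>
      (vh.1 ++ [getSide (PySem.List.len arr) (i+1)],
       vh.2 ++ [getSide (PySem.List.len (PySem.List.pyGetD arr 0 [])) (i+1)])) ([], [])
  let map := computeMap bars.1 bars.2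
  (PySem.List.pyRange 0 (PySem.List.len (PySem.List.pyGetD bars.1 0 [])) 1).foldl (fun s r =>
    (PySem.List.pyRange 0 (PySem.List.len (PySem.List.pyGetD bars.2 0 [])) 1).foldl (fun s c =>
      s + PySem.List.pyGetD (PySem.List.pyGetD arr r []) c 0
            * PySem.List.pyGetD (PySem.List.pyGetD map r []) c 0) s) 0

-- ===== PORT B =====
def compute_alt (arr : List (List Int)) : Int :=
  let m := PySem.List.len arr
  let n := PySem.List.len (PySem.List.pyGetD arr 0 [])
  let L := min m n
  let ab := (PySem.List.pyRange 0 L 1).map (fun l => (min (l+1) (m - l), min (l+1) (n - l)))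
  (PySem.List.pyRange 0 m 1).foldl (fun total r =>
    let p := min (r+1) (m - r)
    let row := PySem.List.pyGetD arr r []
    (PySem.List.pyRange 0 n 1).foldl (fun total c =>
      let q := min (c+1) (n - c)
      total + PySem.List.pyGetD row c 0 * (ab.map (fun xy => min p xy.1 * min q xy.2)).sum) total) 0

-- ===== PRECONDITION & SPEC =====
-- Pre_ excludes exactly the inputs where Python A raises IndexError: an empty arr, an
-- empty first row, or a later row shorter than the first row.
def Pre_compute (arr : List (List Int)) : Prop :=
  arr ≠ [] ∧ arr.headI ≠ [] ∧ ∀ row ∈ arr, arr.headI.length ≤ row.length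
instance (arr : List (List Int)) : Decidable (Pre_compute arr) := by unfold Pre_compute; infer_instance

def pvWitness_compute : List (List Int) := [[1, 2, 3], [4, 5, 6]]

def Spec_compute (arr : List (List Int)) (out : Int) : Prop := out = compute_alt arr
instance (arr : List (List Int)) (out : Int) : Decidable (Spec_compute arr out) := by unfold Spec_compute; infer_instance

-- ===== CLAIM (what is proved, stated in full; the proofs are below) =====
def Claim_equal_compute : Prop := ∀ (arr : List (List Int)), Dom_compute arr → Pre_compute arr → Spec_compute arr (compute arr)

-- ===== LEMMAS AND PROOFS =====

theorem map_range_set {α : Type} (n k : Nat) (f : Nat → α) (v : α) :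
  ((List.range n).map f).set k v = (List.range n).map (fun j => if j = k then v else f j) := by
  apply List.ext_getElem
  · simp
  · intro i hi hi2
    rw [List.getElem_set]
    simp only [List.getElem_map, List.getElem_range]
    by_cases h : k = i
    · subst h; simp
    · rw [if_neg h, if_neg (fun hh => h hh.symm)]

theorem map_range_congr {α : Type} (n : Nat) (f g : Nat → α) (h : ∀ j < n, f j = g j) :
  (List.range n).map f = (List.range n).map g := by
  apply List.map_congr_left; simpa using h

def lsum (K : Nat) (g : Nat → Int) : Int := ((List.range K).map g).sum

theorem lsum_succ (K : Nat) (g : Nat → Int) : lsum (K+1) g = lsum K g + g K := by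
  simp [lsum, List.range_succ]

theorem lsum_congr (K : Nat) (g g' : Nat → Int) (h : ∀ l < K, g l = g' l) : lsum K g = lsum K g' := by
  unfold lsum; rw [map_range_congr K g g' h]

theorem getD_mrange (n k : Nat) (f : Nat → Int) (h : k < n) :
  PySem.List.pyGetD ((List.range n).map f) (k:Int) 0 = f k := by
  rw [PySem.List.pyGetD_natCast, PySem.List.getD_map_range _ _ _ _ h]

theorem addloop_aux (n : Nat) (f u : Nat → Int) (K : Nat) (hK : K ≤ n) :
  (List.range K).foldl (fun hb (i:Nat) =>
      PySem.List.pySetD hb (i:Int) (PySem.List.pyGetD hb (i:Int) 0 + u i)) ((List.range n).map f)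
  = (List.range n).map (fun j => if j < K then f j + u j else f j) := by
  induction K with
  | zero => apply map_range_congr; intro j hj; rw [if_neg (by omega)]
  | succ K ih =>
    rw [List.range_succ, List.foldl_append, ih (by omega)]
    simp only [List.foldl_cons, List.foldl_nil]
    rw [getD_mrange n K _ (by omega), PySem.List.pySetD_natCast, map_range_set]
    apply map_range_congr
    intro j hj
    by_cases h1 : j = K
    · subst h1; rw [if_pos rfl, if_neg (lt_irrefl _), if_pos (by omega)]
    · rw [if_neg h1]
      by_cases h2 : j < K
      · rw [if_pos h2, if_pos (by omega)]
      · rw [if_neg h2, if_neg (by omega)]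

theorem addloop (n : Nat) (f u : Nat → Int) :
  (List.range n).foldl (fun hb (i:Nat) =>
      PySem.List.pySetD hb (i:Int) (PySem.List.pyGetD hb (i:Int) 0 + u i)) ((List.range n).map f)
  = (List.range n).map (fun j => f j + u j) := by
  rw [addloop_aux n f u n le_rfl]
  apply map_range_congr; intro j hj; rw [if_pos hj]

theorem sumrows (n : Nat) (u : Nat → Nat → Int) (K : Nat) (f0 : Nat → Int) :
  ((List.range K).map (fun l => (List.range n).map (u l))).foldl
    (fun hb arr2 => (PySem.List.pyRange 0 (PySem.List.len arr2) 1).foldl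
        (fun hb i => PySem.List.pySetD hb i (PySem.List.pyGetD hb i 0 + PySem.List.pyGetD arr2 i 0)) hb)
    ((List.range n).map f0)
  = (List.range n).map (fun c => f0 c + lsum K (fun l => u l c)) := by
  induction K with
  | zero => simp [lsum]
  | succ K ih =>
    rw [List.range_succ, List.map_append, List.foldl_append, ih]
    simp only [List.map_cons, List.map_nil, List.foldl_cons, List.foldl_nil]
    rw [PySem.List.len_eq, List.length_map, List.length_range, PySem.List.pyRange_zero_nat, List.foldl_map]
    have hcg : ∀ (hb : List Int), ∀ x ∈ List.range n,
        PySem.List.pySetD hb (x:Int) (PySem.List.pyGetD hb (x:Int) 0 + PySem.List.pyGetD ((List.range n).map (u K)) (x:Int) 0)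
        = PySem.List.pySetD hb (x:Int) (PySem.List.pyGetD hb (x:Int) 0 + u K x) := by
      intro hb x hx
      rw [getD_mrange n x _ (List.mem_range.mp hx)]
    rw [PySem.List.foldl_congr_mem _ _ _ _ hcg, addloop]
    apply map_range_congr
    intro j hj
    rw [lsum_succ]; ring

theorem col0loop (m n : Nat) (F : Nat → Nat → Int) (V : Nat → Int) (K : Nat) (hK : K ≤ m) :
  (List.range K).foldl (fun M (i:Nat) =>
      PySem.List.pySetD M (i:Int)
        (PySem.List.pySetD (PySem.List.pyGetD M (i:Int) []) 0 (V i)))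
    ((List.range m).map (fun r => (List.range n).map (F r)))
  = (List.range m).map (fun r => (List.range n).map (fun c => if r < K ∧ c = 0 then V r else F r c)) := by
  induction K with
  | zero =>
    apply map_range_congr; intro r hr; apply map_range_congr; intro c hc
    rw [if_neg (by omega)]
  | succ K ih =>
    rw [List.range_succ, List.foldl_append, ih (by omega)]
    simp only [List.foldl_cons, List.foldl_nil]
    rw [PySem.List.pyGetD_natCast, PySem.List.getD_map_range _ _ _ _ (by omega : K < m)]
    have h0 : PySem.List.pySetD ((List.range n).map (fun c => if K < K ∧ c = 0 then V K else F K c)) 0 (V K)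
        = PySem.List.pySetD ((List.range n).map (F K)) 0 (V K) := by
      congr 1
      apply map_range_congr; intro c hc; rw [if_neg (by omega)]
    rw [h0, show ((0:Int)) = ((0:Nat):Int) by rfl, PySem.List.pySetD_natCast, map_range_set,
        PySem.List.pySetD_natCast, map_range_set]
    apply map_range_congr
    intro r hr
    by_cases h1 : r = K
    · rw [if_pos h1]; subst h1
      apply map_range_congr; intro c hc
      by_cases h2 : c = 0
      · rw [if_pos h2, if_pos (by omega)]
      · rw [if_neg h2, if_neg (by omega)]
    · rw [if_neg h1]
      apply map_range_congr; intro c hc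
      by_cases h2 : r < K ∧ c = 0
      · rw [if_pos h2, if_pos (by omega)]
      · rw [if_neg h2, if_neg (by omega)]

theorem addcell (m n R C : Nat) (G : Nat → Nat → Int) (t : Nat → Int) (hR : R < m) (hC : C < n) (K : Nat) :
  (List.range K).foldl (fun M (i:Nat) =>
      PySem.List.pySetD M (R:Int)
        (PySem.List.pySetD (PySem.List.pyGetD M (R:Int) []) (C:Int)
          (PySem.List.pyGetD (PySem.List.pyGetD M (R:Int) []) (C:Int) 0 + t i)))
    ((List.range m).map (fun r => (List.range n).map (G r)))
  = (List.range m).map (fun r => (List.range n).map (fun c =>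
      if r = R ∧ c = C then G r c + lsum K t else G r c)) := by
  induction K with
  | zero =>
    apply map_range_congr; intro r hr; apply map_range_congr; intro c hc
    by_cases h : r = R ∧ c = C
    · rw [if_pos h]; simp [lsum]
    · rw [if_neg h]
  | succ K ih =>
    rw [List.range_succ, List.foldl_append, ih]
    simp only [List.foldl_cons, List.foldl_nil]
    rw [PySem.List.pyGetD_natCast, PySem.List.getD_map_range _ _ _ _ hR]
    rw [show (PySem.List.pyGetD ((List.range n).map (fun c => if R = R ∧ c = C then G R c + lsum K t else G R c)) (C:Int) 0) = G R C + lsum K t by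
      rw [getD_mrange _ _ _ hC, if_pos ⟨rfl, rfl⟩]]
    rw [PySem.List.pySetD_natCast, map_range_set, PySem.List.pySetD_natCast, map_range_set]
    apply map_range_congr
    intro r hr
    by_cases h1 : r = R
    · rw [if_pos h1]; subst h1
      apply map_range_congr; intro c hc
      by_cases h2 : c = C
      · rw [if_pos h2, if_pos (by exact ⟨rfl, h2⟩), lsum_succ, h2]; ring
      · rw [if_neg h2, if_neg (by simp [h2]), if_neg (by simp [h2])]
    · rw [if_neg h1]
      apply map_range_congr; intro c hc
      rw [if_neg (by simp [h1]), if_neg (by simp [h1])]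

theorem cloop (m n L r : Nat) (t : Nat → Nat → Int) (G : Nat → Nat → Int) (hr : r + 1 < m) (K : Nat) (hK : K + 1 ≤ n) :
  (List.range K).foldl (fun M (c:Nat) =>
      (List.range L).foldl (fun M (i:Nat) =>
        PySem.List.pySetD M (((r+1 : Nat)):Int)
          (PySem.List.pySetD (PySem.List.pyGetD M (((r+1:Nat)):Int) []) (((c+1:Nat)):Int)
            (PySem.List.pyGetD (PySem.List.pyGetD M (((r+1:Nat)):Int) []) (((c+1:Nat)):Int) 0 + t c i))) M)
    ((List.range m).map (fun r' => (List.range n).map (G r')))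
  = (List.range m).map (fun r' => (List.range n).map (fun c' =>
      if r' = r+1 ∧ 1 ≤ c' ∧ c' ≤ K then G r' c' + lsum L (t (c'-1)) else G r' c')) := by
  induction K with
  | zero =>
    apply map_range_congr; intro a ha; apply map_range_congr; intro c hc
    rw [if_neg (by omega)]
  | succ K ih =>
    rw [List.range_succ, List.foldl_append, ih (by omega)]
    simp only [List.foldl_cons, List.foldl_nil]
    rw [addcell m n (r+1) (K+1) _ (t K) hr (by omega) L]
    apply map_range_congr
    intro r' hr'
    apply map_range_congr
    intro c' hc'
    by_cases h1 : r' = r+1 ∧ c' = K+1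
    · rw [if_pos h1, if_neg (by omega), if_pos (by omega)]
      have : c' - 1 = K := by omega
      rw [this]
    · rw [if_neg h1]
      by_cases h2 : r' = r+1 ∧ 1 ≤ c' ∧ c' ≤ K
      · rw [if_pos h2, if_pos (by omega)]
      · rw [if_neg h2, if_neg (by omega)]

theorem rloop (m n L : Nat) (v h G : Nat → Nat → Int) (hn : 1 ≤ n) (K : Nat) (hK : K ≤ m - 1) (hm : 1 ≤ m) :
  (List.range K).foldl (fun M (r:Nat) =>
      (PySem.List.pyRange 0 (PySem.List.len (PySem.List.pyGetD M (r:Int) []) - 1) 1).foldl (fun M c =>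
        (PySem.List.pyRange 0 (PySem.List.len ((List.range L).map (fun l => (List.range n).map (h l)))) 1).foldl (fun M i =>
          PySem.List.pySetD M ((r:Int)+1)
            (PySem.List.pySetD (PySem.List.pyGetD M ((r:Int)+1) []) (c+1)
              (PySem.List.pyGetD (PySem.List.pyGetD M ((r:Int)+1) []) (c+1) 0
                + PySem.List.pyGetD (PySem.List.pyGetD ((List.range L).map (fun l => (List.range m).map (v l))) i []) ((r:Int)+1) 0
                  * PySem.List.pyGetD (PySem.List.pyGetD ((List.range L).map (fun l => (List.range n).map (h l))) i []) (c+1) 0))) M) M)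
    ((List.range m).map (fun r' => (List.range n).map (G r')))
  = (List.range m).map (fun r' => (List.range n).map (fun c' =>
      if 1 ≤ r' ∧ r' ≤ K ∧ 1 ≤ c' then G r' c' + lsum L (fun l => v l r' * h l c') else G r' c')) := by
  induction K with
  | zero =>
    apply map_range_congr; intro a ha; apply map_range_congr; intro c hc
    rw [if_neg (by omega)]
  | succ K ih =>
    rw [List.range_succ, List.foldl_append, ih (by omega)]
    simp only [List.foldl_cons, List.foldl_nil]
    set GK : Nat → Nat → Int := fun r' c' =>
      if 1 ≤ r' ∧ r' ≤ K ∧ 1 ≤ c' then G r' c' + lsum L (fun l => v l r' * h l c') else G r' c' with hGK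
    -- row K read: length n
    rw [PySem.List.pyGetD_natCast, PySem.List.getD_map_range _ _ _ _ (by omega : K < m)]
    simp only [PySem.List.len_eq, List.length_map, List.length_range]
    rw [show ((n:Int) - 1) = ((n-1 : Nat):Int) by omega, PySem.List.pyRange_zero_nat (n-1), List.foldl_map]
    have hbody : ∀ (M : List (List Int)), ∀ y ∈ List.range (n-1),
        (PySem.List.pyRange 0 (L:Int) 1).foldl (fun M i =>
          PySem.List.pySetD M ((K:Int) + 1)
            (PySem.List.pySetD (PySem.List.pyGetD M ((K:Int) + 1) []) ((y:Int) + 1)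
              (PySem.List.pyGetD (PySem.List.pyGetD M ((K:Int) + 1) []) ((y:Int) + 1) 0 +
                PySem.List.pyGetD
                    (PySem.List.pyGetD ((List.range L).map (fun l => (List.range m).map (v l))) i [])
                    ((K:Int) + 1) 0 *
                  PySem.List.pyGetD
                    (PySem.List.pyGetD ((List.range L).map (fun l => (List.range n).map (h l))) i [])
                    ((y:Int) + 1) 0))) M
        = (List.range L).foldl (fun M (i:Nat) =>
            PySem.List.pySetD M (((K+1 : Nat)):Int)
              (PySem.List.pySetD (PySem.List.pyGetD M (((K+1:Nat)):Int) []) (((y+1:Nat)):Int)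
                (PySem.List.pyGetD (PySem.List.pyGetD M (((K+1:Nat)):Int) []) (((y+1:Nat)):Int) 0
                  + (fun c i => v i (K+1) * h i (c+1)) y i)) ) M := by
      intro M y hy
      have hy' : y < n - 1 := List.mem_range.mp hy
      rw [PySem.List.pyRange_zero_nat, List.foldl_map]
      apply PySem.List.foldl_congr_mem
      intro acc i hi
      have hi' : i < L := List.mem_range.mp hi
      rw [show ((K:Int) + 1) = (((K+1:Nat)):Int) by push_cast; ring,
          show ((y:Int) + 1) = (((y+1:Nat)):Int) by push_cast; ring,
          PySem.List.pyGetD_natCast ((List.range L).map (fun l => (List.range m).map (v l))),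
          PySem.List.getD_map_range _ _ _ _ hi',
          PySem.List.pyGetD_natCast ((List.range L).map (fun l => (List.range n).map (h l))),
          PySem.List.getD_map_range _ _ _ _ hi',
          getD_mrange _ _ _ (by omega : K + 1 < m),
          getD_mrange _ _ _ (by omega : y + 1 < n)]
    rw [PySem.List.foldl_congr_mem _ _ _ _ hbody]
    rw [cloop m n L K (fun c i => v i (K+1) * h i (c+1)) _ (by omega : K + 1 < m) (n-1) (by omega)]
    apply map_range_congr
    intro r' hr'
    apply map_range_congr
    intro c' hc'
    by_cases h1 : r' = K + 1 ∧ 1 ≤ c' ∧ c' ≤ n - 1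
    · rw [if_pos h1, if_neg (by omega), if_pos (by omega)]
      have : c' - 1 + 1 = c' := by omega
      rw [this, h1.1]
    · rw [if_neg h1]
      by_cases h2 : 1 ≤ r' ∧ r' ≤ K ∧ 1 ≤ c'
      · rw [if_pos h2, if_pos (by omega)]
      · rw [if_neg h2, if_neg (by omega)]

theorem zeroArray_eq (N : Nat) : zeroArray (N:Int) = (List.range N).map (fun _ => (0:Int)) := by
  rw [zeroArray, PySem.List.pyRange_zero_nat, List.map_map]; rfl

theorem computeMap_eq (m n L : Nat) (v h : Nat → Nat → Int)
  (hm : 1 ≤ m) (hn : 1 ≤ n) (hL : 1 ≤ L) :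
  computeMap ((List.range L).map (fun l => (List.range m).map (v l)))
             ((List.range L).map (fun l => (List.range n).map (h l)))
  = (List.range m).map (fun r => (List.range n).map (fun c =>
      if c = 0 then lsum L (fun l => v l r)
      else if r = 0 then lsum L (fun l => h l c)
      else lsum L (fun l => v l r * h l c))) := by
  simp only [computeMap]
  rw [show PySem.List.pyGetD ((List.range L).map (fun l => (List.range m).map (v l))) 0 [] = (List.range m).map (v 0) from by
        rw [show ((0:Int)) = ((0:Nat):Int) by rfl, PySem.List.pyGetD_natCast, PySem.List.getD_map_range _ _ _ _ hL],
      show PySem.List.pyGetD ((List.range L).map (fun l => (List.range n).map (h l))) 0 [] = (List.range n).map (h 0) from by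
        rw [show ((0:Int)) = ((0:Nat):Int) by rfl, PySem.List.pyGetD_natCast, PySem.List.getD_map_range _ _ _ _ hL],
      show PySem.List.len ((List.range m).map (v 0)) = (m:Int) from by
        rw [PySem.List.len_eq]; simp,
      show PySem.List.len ((List.range n).map (h 0)) = (n:Int) from by
        rw [PySem.List.len_eq]; simp]
  rw [zeroArray_eq n, zeroArray_eq m]
  -- map0
  rw [PySem.List.foldl_append_singleton_eq_map (f := fun _ => (List.range n).map (fun _ => (0:Int))),
      List.nil_append, PySem.List.pyRange_zero_nat, List.map_map]
  -- horizontal bar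
  rw [sumrows n h L (fun _ => 0)]
  -- vertical bar
  have hvb0 := sumrows m v L (fun _ => 0)
  rw [List.foldl_map] at hvb0
  rw [show PySem.List.len ((List.range L).map (fun l => (List.range m).map (v l))) = (L:Int) from by
        rw [PySem.List.len_eq]; simp,
      PySem.List.pyRange_zero_nat L, List.foldl_map]
  have hcgv : ∀ (vb : List Int), ∀ a ∈ List.range L,
      (PySem.List.pyRange 0 (PySem.List.len (PySem.List.pyGetD ((List.range L).map (fun l => (List.range m).map (v l))) ((a:Nat):Int) [])) 1).foldl
        (fun vb b => PySem.List.pySetD vb b (PySem.List.pyGetD vb b 0 + PySem.List.pyGetD (PySem.List.pyGetD ((List.range L).map (fun l => (List.range m).map (v l))) ((a:Nat):Int) []) b 0)) vb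
      = (PySem.List.pyRange 0 (PySem.List.len ((List.range m).map (v a))) 1).foldl
        (fun vb b => PySem.List.pySetD vb b (PySem.List.pyGetD vb b 0 + PySem.List.pyGetD ((List.range m).map (v a)) b 0)) vb := by
    intro vb a ha
    rw [PySem.List.pyGetD_natCast, PySem.List.getD_map_range _ _ _ _ (List.mem_range.mp ha)]
  rw [PySem.List.foldl_congr_mem _ _ _ _ hcgv, hvb0]
  -- map1 into canonical map-map form
  have hmap1 : PySem.List.pySetD ((List.range m).map ((fun x => (List.range n).map (fun x => (0:Int))) ∘ fun k => ((k:Nat):Int))) 0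
        ((List.range n).map (fun c => 0 + lsum L (fun l => h l c)))
      = (List.range m).map (fun r => (List.range n).map (fun c => if r = 0 then lsum L (fun l => h l c) else 0)) := by
    rw [show ((0:Int)) = ((0:Nat):Int) by rfl, PySem.List.pySetD_natCast, map_range_set]
    apply map_range_congr; intro j hj
    by_cases hj0 : j = 0
    · rw [if_pos hj0]; subst hj0
      apply map_range_congr; intro c hc; rw [if_pos rfl]; ring
    · rw [if_neg hj0]
      apply map_range_congr; intro c hc; rw [if_neg hj0]
  rw [hmap1]
  -- the col-0 loop (vertical bar written into column 0)
  rw [show PySem.List.len ((List.range m).map (fun c => 0 + lsum L (fun l => v l c))) = (m:Int) from by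
        rw [PySem.List.len_eq]; simp,
      PySem.List.pyRange_zero_nat m, List.foldl_map]
  have hcg0 : ∀ (M : List (List Int)), ∀ i ∈ List.range m,
      PySem.List.pySetD M ((i:Nat):Int)
        (PySem.List.pySetD (PySem.List.pyGetD M ((i:Nat):Int) []) 0
          (PySem.List.pyGetD ((List.range m).map (fun c => 0 + lsum L (fun l => v l c))) ((i:Nat):Int) 0))
      = PySem.List.pySetD M ((i:Nat):Int)
        (PySem.List.pySetD (PySem.List.pyGetD M ((i:Nat):Int) []) 0 ((fun i => 0 + lsum L (fun l => v l i)) i)) := by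
    intro M i hi
    rw [getD_mrange _ _ _ (List.mem_range.mp hi)]
  rw [PySem.List.foldl_congr_mem _ _ _ _ hcg0,
      col0loop m n _ _ m le_rfl]
  -- simplify map2 entries
  have hmap2 : (List.range m).map (fun r => (List.range n).map
        (fun c => if r < m ∧ c = 0 then 0 + lsum L (fun l => v l r) else if r = 0 then lsum L (fun l => h l c) else 0))
      = (List.range m).map (fun r => (List.range n).map
        (fun c => if c = 0 then lsum L (fun l => v l r) else if r = 0 then lsum L (fun l => h l c) else 0)) := by
    apply map_range_congr; intro r hr
    apply map_range_congr; intro c hc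
    by_cases hc0 : c = 0
    · rw [if_pos ⟨hr, hc0⟩, if_pos hc0]; ring
    · rw [if_neg (by simp [hc0]), if_neg hc0]
  rw [hmap2]
  -- the interior triple loop
  rw [show PySem.List.len ((List.range m).map (fun r => (List.range n).map
        (fun c => if c = 0 then lsum L (fun l => v l r) else if r = 0 then lsum L (fun l => h l c) else 0))) = (m:Int) from by
        rw [PySem.List.len_eq]; simp,
      show ((m:Int) - 1) = ((m-1 : Nat):Int) by omega,
      PySem.List.pyRange_zero_nat (m-1), List.foldl_map]
  rw [rloop m n L v h _ hn (m-1) le_rfl hm]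
  apply map_range_congr; intro r hr
  apply map_range_congr; intro c hc
  by_cases h1 : 1 ≤ r ∧ r ≤ m - 1 ∧ 1 ≤ c
  · rw [if_pos h1, if_neg (by omega), if_neg (by omega), if_neg (by omega), if_neg (by omega)]
    ring
  · rw [if_neg h1]
    by_cases hc0 : c = 0
    · rw [if_pos hc0, if_pos hc0]
    · rw [if_neg hc0, if_neg hc0, if_pos (by omega), if_pos (by omega)]

theorem pyGetD_zero_headI (xs : List (List Int)) : PySem.List.pyGetD xs 0 [] = xs.headI := by
  rw [PySem.List.pyGetD_zero]; cases xs <;> rfl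

theorem tentloop (N : Nat) (K : Nat) (hK : 2*K ≤ N+1) :
  (List.range K).foldl (fun bar (i:Nat) =>
      PySem.List.pySetD (PySem.List.pySetD bar (i:Int) ((i:Int)+1))
        (PySem.List.len (PySem.List.pySetD bar (i:Int) ((i:Int)+1)) - 1 - (i:Int)) ((i:Int)+1))
      ((List.range N).map (fun _ => (0:Int)))
    = (List.range N).map (fun j => if j < K ∨ N - K ≤ j then min ((j:Int)+1) ((N:Int)-(j:Int)) else 0) := by
  induction K with
  | zero => simp only [List.range_zero, List.foldl_nil]
            apply map_range_congr; intro j hj; rw [if_neg]; omega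
  | succ K ih =>
    rw [List.range_succ, List.foldl_append, ih (by omega)]
    simp only [List.foldl_cons, List.foldl_nil]
    rw [PySem.List.pySetD_natCast, map_range_set]
    have hlen : PySem.List.len ((List.range N).map (fun j => if j = K then (K:Int)+1 else if j < K ∨ N - K ≤ j then min ((j:Int)+1) ((N:Int)-(j:Int)) else 0)) = (N:Int) := by
      rw [PySem.List.len_eq]; simp
    rw [hlen]
    have hidx : (N:Int) - 1 - (K:Int) = ((N - 1 - K : Nat) : Int) := by omega
    rw [hidx, PySem.List.pySetD_natCast, map_range_set]
    apply map_range_congr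
    intro j hj
    have hKN : K ≤ N - 1 := by omega
    by_cases h1 : j = N - 1 - K
    · rw [if_pos h1]
      rw [if_pos (by omega)]
      subst h1; omega
    · rw [if_neg h1]
      by_cases h2 : j = K
      · rw [if_pos h2, if_pos (by omega)]; subst h2; omega
      · rw [if_neg h2]
        by_cases h3 : j < K ∨ N - K ≤ j
        · rw [if_pos h3, if_pos (by omega)]
        · rw [if_neg h3, if_neg (by omega)]

-- loop 2 of getSide

theorem midloop (N mxN : Nat) (g : Nat → Int) (K : Nat) (hK : mxN + K ≤ N) :
  (List.range K).foldl (fun bar (i:Nat) => PySem.List.pySetD bar ((i:Int) + (mxN:Int)) (mxN:Int))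
      ((List.range N).map g)
    = (List.range N).map (fun j => if mxN ≤ j ∧ j < mxN + K then (mxN:Int) else g j) := by
  induction K with
  | zero => apply map_range_congr; intro j hj; rw [if_neg]; omega
  | succ K ih =>
    rw [List.range_succ, List.foldl_append, ih (by omega)]
    simp only [List.foldl_cons, List.foldl_nil]
    have hidx : (K:Int) + (mxN:Int) = ((K + mxN : Nat) : Int) := by push_cast; ring
    rw [hidx, PySem.List.pySetD_natCast, map_range_set]
    apply map_range_congr
    intro j hj
    by_cases h1 : j = K + mxN
    · rw [if_pos h1, if_pos (by omega)]
    · rw [if_neg h1]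
      by_cases h2 : mxN ≤ j ∧ j < mxN + K
      · rw [if_pos h2, if_pos (by omega)]
      · rw [if_neg h2, if_neg (by omega)]

theorem getSide_eq (N : Nat) (l : Int) (h1 : 1 ≤ l) (h2 : l ≤ (N:Int)) :
  getSide (N:Int) l = (List.range N).map
    (fun (j : Nat) => min (min ((j:Int)+1) ((N:Int)-(j:Int))) (min ((N:Int) - l + 1) l)) := by
  simp only [getSide]
  set mx : Int := min ((N:Int) - l + 1) l with hmx
  have hmx1 : 1 ≤ mx := by omega
  have hmx2 : 2*mx ≤ (N:Int)+1 := by omega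
  set mxN : Nat := mx.toNat with hmxN
  have hcast : mx = (mxN : Int) := by omega
  -- loop 1
  rw [zeroArray_eq, hcast, PySem.List.pyRange_zero_nat, List.foldl_map]
  rw [tentloop N mxN (by omega)]
  -- loop 2
  have hlen : PySem.List.len ((List.range N).map (fun j => if j < mxN ∨ N - mxN ≤ j then min ((j:Int)+1) ((N:Int)-(j:Int)) else 0)) = (N:Int) := by
    rw [PySem.List.len_eq]; simp
  rw [hlen]
  by_cases hmid : (N:Int) - 2*(mxN:Int) ≤ 0
  · rw [PySem.List.pyRange_one_eq_nil hmid]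
    simp only [List.foldl_nil]
    apply map_range_congr
    intro j hj
    rw [if_pos (by omega)]
    omega
  · have : (N:Int) - 2*(mxN:Int) = ((N - 2*mxN : Nat) : Int) := by omega
    rw [this, PySem.List.pyRange_zero_nat, List.foldl_map]
    rw [midloop N mxN _ (N - 2*mxN) (by omega)]
    apply map_range_congr
    intro j hj
    by_cases hc : mxN ≤ j ∧ j < mxN + (N - 2*mxN)
    · rw [if_pos hc]; omega
    · rw [if_neg hc]
      rw [if_pos (by omega)]
      omega

theorem bridge (m n L : Nat) (hm : 1 ≤ m) (hn : 1 ≤ n) (hLm : L ≤ m) (hLn : L ≤ n) (y c : Nat) :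
  (if c = 0 then lsum L (fun l => min (min ((y:Int)+1) ((m:Int)-(y:Int))) (min ((m:Int) - ((l:Int)+1) + 1) ((l:Int)+1)))
   else if y = 0 then lsum L (fun l => min (min ((c:Int)+1) ((n:Int)-(c:Int))) (min ((n:Int) - ((l:Int)+1) + 1) ((l:Int)+1)))
   else lsum L (fun l => min (min ((y:Int)+1) ((m:Int)-(y:Int))) (min ((m:Int) - ((l:Int)+1) + 1) ((l:Int)+1))
                * min (min ((c:Int)+1) ((n:Int)-(c:Int))) (min ((n:Int) - ((l:Int)+1) + 1) ((l:Int)+1))))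
  = lsum L (fun l => min (min ((y:Int)+1) ((m:Int)-(y:Int))) (min ((l:Int)+1) ((m:Int)-(l:Int)))
            * min (min ((c:Int)+1) ((n:Int)-(c:Int))) (min ((l:Int)+1) ((n:Int)-(l:Int)))) := by
  split_ifs with h1 h2
  · apply lsum_congr; intro l hl
    have e2 : min (min ((c:Int)+1) ((n:Int)-(c:Int))) (min ((l:Int)+1) ((n:Int)-(l:Int))) = 1 := by
      subst h1; push_cast; omega
    rw [e2, mul_one]; omega
  · apply lsum_congr; intro l hl
    have e1 : min (min ((y:Int)+1) ((m:Int)-(y:Int))) (min ((l:Int)+1) ((m:Int)-(l:Int))) = 1 := by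
      subst h2; push_cast; omega
    rw [e1, one_mul]; omega
  · apply lsum_congr; intro l hl
    have e1 : min (min ((y:Int)+1) ((m:Int)-(y:Int))) (min ((m:Int) - ((l:Int)+1) + 1) ((l:Int)+1))
        = min (min ((y:Int)+1) ((m:Int)-(y:Int))) (min ((l:Int)+1) ((m:Int)-(l:Int))) := by omega
    have e2 : min (min ((c:Int)+1) ((n:Int)-(c:Int))) (min ((n:Int) - ((l:Int)+1) + 1) ((l:Int)+1))
        = min (min ((c:Int)+1) ((n:Int)-(c:Int))) (min ((l:Int)+1) ((n:Int)-(l:Int))) := by omega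
    rw [e1, e2]

theorem compute_eq_alt (arr : List (List Int)) (hm : 1 ≤ arr.length) (hn : 1 ≤ arr.headI.length) :
    compute arr = compute_alt arr := by
  simp only [compute, compute_alt]
  rw [pyGetD_zero_headI arr]
  set m := arr.length with hm'
  set n := arr.headI.length with hn'
  set L : Nat := min m n with hL'
  have hL : 1 ≤ L := by omega
  rw [show (min (PySem.List.len arr) (PySem.List.len arr.headI)) = ((L:Nat):Int) from by
        simp only [PySem.List.len_eq]; omega]
  rw [PySem.List.foldl_prod_mk (f := fun s e => s ++ [getSide (PySem.List.len arr) (e+1)])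
        (g := fun s e => s ++ [getSide (PySem.List.len arr.headI) (e+1)])]
  simp only [PySem.List.foldl_append_singleton_eq_map, List.nil_append]
  rw [PySem.List.pyRange_zero_nat L]
  simp only [PySem.List.len_eq, List.map_map]
  -- bars as tent maps
  have hbars1 : (List.range L).map ((fun x => getSide ((arr.length:Nat):Int) (x + 1)) ∘ (fun k : Nat => (k:Int)))
      = (List.range L).map (fun l : Nat => (List.range m).map
          (fun (j:Nat) => min (min ((j:Int)+1) ((m:Int)-(j:Int))) (min ((m:Int) - ((l:Int)+1) + 1) ((l:Int)+1)))) := by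
    apply map_range_congr; intro k hk
    simp only [Function.comp_apply]
    rw [getSide_eq m ((k:Int)+1) (by omega) (by omega)]
  have hbars2 : (List.range L).map ((fun x => getSide ((arr.headI.length:Nat):Int) (x + 1)) ∘ (fun k : Nat => (k:Int)))
      = (List.range L).map (fun l : Nat => (List.range n).map
          (fun (j:Nat) => min (min ((j:Int)+1) ((n:Int)-(j:Int))) (min ((n:Int) - ((l:Int)+1) + 1) ((l:Int)+1)))) := by
    apply map_range_congr; intro k hk
    simp only [Function.comp_apply]
    rw [getSide_eq n ((k:Int)+1) (by omega) (by omega)]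
  rw [hbars1, hbars2]
  rw [computeMap_eq m n L _ _ hm hn hL]
  rw [show PySem.List.pyGetD ((List.range L).map (fun l : Nat => (List.range m).map
          (fun (j:Nat) => min (min ((j:Int)+1) ((m:Int)-(j:Int))) (min ((m:Int) - ((l:Int)+1) + 1) ((l:Int)+1))))) 0 []
        = (List.range m).map (fun (j:Nat) => min (min ((j:Int)+1) ((m:Int)-(j:Int))) (min ((m:Int) - ((0:Int)+1) + 1) ((0:Int)+1))) from by
        rw [show ((0:Int)) = ((0:Nat):Int) by rfl, PySem.List.pyGetD_natCast, PySem.List.getD_map_range _ _ _ _ hL]]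
  rw [show PySem.List.pyGetD ((List.range L).map (fun l : Nat => (List.range n).map
          (fun (j:Nat) => min (min ((j:Int)+1) ((n:Int)-(j:Int))) (min ((n:Int) - ((l:Int)+1) + 1) ((l:Int)+1))))) 0 []
        = (List.range n).map (fun (j:Nat) => min (min ((j:Int)+1) ((n:Int)-(j:Int))) (min ((n:Int) - ((0:Int)+1) + 1) ((0:Int)+1))) from by
        rw [show ((0:Int)) = ((0:Nat):Int) by rfl, PySem.List.pyGetD_natCast, PySem.List.getD_map_range _ _ _ _ hL]]
  simp only [List.length_map, List.length_range]
  rw [← hm', ← hn']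
  simp only [Function.comp_def]
  rw [PySem.List.pyRange_zero_nat m, List.foldl_map, List.foldl_map,
      PySem.List.pyRange_zero_nat n]
  have hin1 : ∀ (s:Int), ∀ y ∈ List.range m,
      ((List.range n).map (fun k : Nat => (k:Int))).foldl (fun s c =>
        s + PySem.List.pyGetD (PySem.List.pyGetD arr (y:Int) []) c 0
              * PySem.List.pyGetD (PySem.List.pyGetD ((List.range m).map (fun (r:Nat) => (List.range n).map (fun (c:Nat) =>
        if c = 0 then lsum L (fun l => min (min ((r:Int)+1) ((m:Int)-(r:Int))) (min ((m:Int) - ((l:Int)+1) + 1) ((l:Int)+1)))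
        else if r = 0 then lsum L (fun l => min (min ((c:Int)+1) ((n:Int)-(c:Int))) (min ((n:Int) - ((l:Int)+1) + 1) ((l:Int)+1)))
        else lsum L (fun l => min (min ((r:Int)+1) ((m:Int)-(r:Int))) (min ((m:Int) - ((l:Int)+1) + 1) ((l:Int)+1)) * min (min ((c:Int)+1) ((n:Int)-(c:Int))) (min ((n:Int) - ((l:Int)+1) + 1) ((l:Int)+1)))))) (y:Int) []) c 0) s
      = s + ((List.range n).map (fun c : Nat =>
          PySem.List.pyGetD (PySem.List.pyGetD arr (y:Int) []) ((c:Nat):Int) 0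
            * PySem.List.pyGetD (PySem.List.pyGetD ((List.range m).map (fun (r:Nat) => (List.range n).map (fun (c:Nat) =>
        if c = 0 then lsum L (fun l => min (min ((r:Int)+1) ((m:Int)-(r:Int))) (min ((m:Int) - ((l:Int)+1) + 1) ((l:Int)+1)))
        else if r = 0 then lsum L (fun l => min (min ((c:Int)+1) ((n:Int)-(c:Int))) (min ((n:Int) - ((l:Int)+1) + 1) ((l:Int)+1)))
        else lsum L (fun l => min (min ((r:Int)+1) ((m:Int)-(r:Int))) (min ((m:Int) - ((l:Int)+1) + 1) ((l:Int)+1)) * min (min ((c:Int)+1) ((n:Int)-(c:Int))) (min ((n:Int) - ((l:Int)+1) + 1) ((l:Int)+1)))))) (y:Int) []) ((c:Nat):Int) 0)).sum := by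
    intro s y hy
    rw [List.foldl_map, PySem.List.foldl_add]
  have hin2 : ∀ (s:Int), ∀ y ∈ List.range m,
      ((List.range n).map (fun k : Nat => (k:Int))).foldl (fun total c =>
        total + PySem.List.pyGetD (PySem.List.pyGetD arr (y:Int) []) c 0
              * ((List.range L).map (fun x : Nat =>
                  min (min ((y:Int) + 1) ((m:Int) - (y:Int))) (min ((x:Int) + 1) ((m:Int) - (x:Int))) *
                    min (min (c + 1) ((n:Int) - c)) (min ((x:Int) + 1) ((n:Int) - (x:Int))))).sum) s
      = s + ((List.range n).map (fun c : Nat =>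
          PySem.List.pyGetD (PySem.List.pyGetD arr (y:Int) []) ((c:Nat):Int) 0
            * ((List.range L).map (fun x : Nat =>
                  min (min ((y:Int) + 1) ((m:Int) - (y:Int))) (min ((x:Int) + 1) ((m:Int) - (x:Int))) *
                    min (min (((c:Nat):Int) + 1) ((n:Int) - ((c:Nat):Int))) (min ((x:Int) + 1) ((n:Int) - (x:Int))))).sum)).sum := by
    intro s y hy
    rw [List.foldl_map, PySem.List.foldl_add]
  rw [PySem.List.foldl_congr_mem _ _ _ _ hin1, PySem.List.foldl_congr_mem _ _ _ _ hin2,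
      PySem.List.foldl_add, PySem.List.foldl_add]
  congr 1
  apply congrArg List.sum
  apply map_range_congr; intro y hy
  apply congrArg List.sum
  apply map_range_congr; intro c hc
  congr 1
  rw [PySem.List.pyGetD_natCast ((List.range m).map _) y, PySem.List.getD_map_range _ _ _ _ hy,
      getD_mrange _ _ _ hc]
  exact bridge m n L hm hn (by omega) (by omega) y c

-- ===== VERDICT (by name: the statement is the Claim_ definition above) =====

theorem compute_spec : Claim_equal_compute := by
  intro arr _ hpre
  unfold Spec_compute
  exact compute_eq_alt arr (List.length_pos_iff.mpr hpre.1)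
    (List.length_pos_iff.mpr hpre.2.1)
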